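-- pv_equiv track=rewrite | github.com/VictorGiuPer/mass_spec_v2 | src/peak_detection/detect_suspicious.py | group_suspicious_zones
-- ===== SOURCE A (Python) =====
-- def group_suspicious_zones(suspicious_mask, min_zone_size=3, merge_gap=2):
--     """
--     Group consecutive suspicious points into zones and optionally merge nearby ones.
--     """
--     zones = []
--     start_idx = None
--
--     for i, val in enumerate(suspicious_mask):
--         if val and start_idx is None:
--             start_idx = i
--         elif not val and start_idx is not None:
--             if (i - start_idx) >= min_zone_size:
--                 zones.append((start_idx, i - 1))
--             start_idx = None
--
--     if start_idx is not None and (len(suspicious_mask) - start_idx) >= min_zone_size: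
--         zones.append((start_idx, len(suspicious_mask) - 1))
--
--     if merge_gap > 0 and len(zones) > 1:
--         merged_zones = []
--         current_start, current_end = zones[0]
--
--         for next_start, next_end in zones[1:]:
--             if next_start - current_end <= merge_gap:
--                 current_end = next_end
--             else:
--                 merged_zones.append((current_start, current_end))
--                 current_start, current_end = next_start, next_end
--
--         merged_zones.append((current_start, current_end))
--         zones = merged_zones
--
--     return zones
-- ===== SOURCE B (Python) =====
-- def group_suspicious_zones(suspicious_mask, min_zone_size=3, merge_gap=2):
--     # Edge detection: pad the mask with False on both sides, find rising edges
--     # (run starts) and falling edges (run ends) on the padded signal, pair them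
--     # up, filter by length; then merge nearby zones right-to-left.
--     padded = [False] + [bool(v) for v in suspicious_mask] + [False]
--     edges = list(zip(padded, padded[1:]))
--     starts = [j for j, (a, b) in enumerate(edges) if not a and b]
--     ends = [j - 1 for j, (a, b) in enumerate(edges) if a and not b]
--     zones = [(s, e) for s, e in zip(starts, ends) if e - s + 1 >= min_zone_size]
--
--     if merge_gap > 0 and len(zones) > 1:
--         # Merge from the right: keep the merged suffix in reverse order; the
--         # last slot holds the leftmost (still growing) merged zone.
--         merged_rev = [zones[-1]]
--         for z in reversed(zones[:-1]):
--             cur = merged_rev[-1]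
--             if cur[0] - z[1] <= merge_gap:
--                 merged_rev[-1] = (z[0], cur[1])
--             else:
--                 merged_rev.append(z)
--         zones = merged_rev[::-1]
--     return zones
-- ===== Notes on version B (the rewrite author's own statement) =====
-- stated objective: alternative
-- what changed: Replaces A's stateful left-to-right scan (start_idx bookkeeping, trailing-run check, accumulator merge loop) with an edge-detection pipeline: pad the mask with False, pair each element with its successor via zip, read run starts off the rising edges and run ends off the falling edges, zip them into zones, and merge nearby zones by a right-to-left pass that grows the leftmost merged zone.
import Mathlib
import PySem

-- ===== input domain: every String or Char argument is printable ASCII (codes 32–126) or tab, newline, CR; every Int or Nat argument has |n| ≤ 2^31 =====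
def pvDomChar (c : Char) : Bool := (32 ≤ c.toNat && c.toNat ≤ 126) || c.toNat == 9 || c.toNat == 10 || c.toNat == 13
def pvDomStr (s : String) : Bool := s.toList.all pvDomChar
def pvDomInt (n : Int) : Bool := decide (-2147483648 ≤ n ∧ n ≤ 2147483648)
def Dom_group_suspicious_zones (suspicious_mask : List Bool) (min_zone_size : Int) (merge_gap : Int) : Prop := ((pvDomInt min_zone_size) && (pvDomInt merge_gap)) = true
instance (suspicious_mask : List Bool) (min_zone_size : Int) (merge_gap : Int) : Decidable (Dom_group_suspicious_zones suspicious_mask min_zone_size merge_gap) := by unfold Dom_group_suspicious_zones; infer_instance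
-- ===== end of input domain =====

-- B replaces A's stateful scan by edge detection on the False-padded mask
-- (rising edges = run starts, falling edges = run ends, zipped into zones)
-- and merges nearby zones by a right-to-left pass; objective: alternative, same cost.

-- ===== PORT A =====
-- A's for-loop over enumerate(suspicious_mask) as structural recursion carrying
-- the index i and the loop state (zones, start_idx).
def pyA_loop (minz : Int) : List Bool → Int → Option Int → List (Int × Int) → (List (Int × Int) × Option Int)
  | [], _, start, zones => (zones, start)
  | val :: rest, i, start, zones =>
    if val && start.isNone then pyA_loop minz rest (i + 1) (some i) zones
    else if !val && start.isSome then
      pyA_loop minz rest (i + 1) none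
        (if i - start.getD 0 ≥ minz then zones ++ [(start.getD 0, i - 1)] else zones)
    else pyA_loop minz rest (i + 1) start zones

def group_suspicious_zones (suspicious_mask : List Bool) (min_zone_size : Int) (merge_gap : Int) : List (Int × Int) :=
  let zones : List (Int × Int) :=
    match pyA_loop min_zone_size suspicious_mask 0 none [] with
    | (z, some s) =>
      if (suspicious_mask.length : Int) - s ≥ min_zone_size then
        z ++ [(s, (suspicious_mask.length : Int) - 1)]
      else z
    | (z, none) => z
  if merge_gap > 0 ∧ zones.length > 1 then
    match zones with
    | [] => zones
    | z0 :: rest =>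
      let acc := rest.foldl
        (fun (a : List (Int × Int) × Int × Int) z =>
          if z.1 - a.2.2 ≤ merge_gap then (a.1, a.2.1, z.2)
          else (a.1 ++ [(a.2.1, a.2.2)], z.1, z.2))
        ([], z0.1, z0.2)
      acc.1 ++ [(acc.2.1, acc.2.2)]
  else zones

-- ===== PORT B =====
-- Source B's edge-detection pipeline. The reversed merge loop appends to the
-- python list merged_rev and finally reverses it; the Lean accumulator keeps
-- merged_rev in reversed order (cons = python append, head = merged_rev[-1]),
-- so python's final [::-1] is the identity on this representation.
def group_suspicious_zones_alt (suspicious_mask : List Bool) (min_zone_size : Int) (merge_gap : Int) : List (Int × Int) :=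
  let padded : List Bool := [false] ++ suspicious_mask ++ [false]
  let edges := padded.zip (padded.drop 1)
  let starts : List Int :=
    ((PySem.List.enumerate edges 0).filter (fun x => !x.2.1 && x.2.2)).map (fun x => x.1)
  let ends : List Int :=
    ((PySem.List.enumerate edges 0).filter (fun x => x.2.1 && !x.2.2)).map (fun x => x.1 - 1)
  let zones := (starts.zip ends).filter (fun z => decide (z.2 - z.1 + 1 ≥ min_zone_size))
  if merge_gap > 0 ∧ zones.length > 1 then
    match zones.getLast? with
    | none => zones
    | some zl =>
      ((zones.dropLast).reverse).foldl
        (fun mrev z =>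
          match mrev with
          | cur :: rest => if cur.1 - z.2 ≤ merge_gap then (z.1, cur.2) :: rest else z :: cur :: rest
          | [] => [z])
        [zl]
  else zones

-- ===== PRECONDITION & SPEC =====
def Spec_group_suspicious_zones (suspicious_mask : List Bool) (min_zone_size : Int) (merge_gap : Int) (out : List (Int × Int)) : Prop := out = group_suspicious_zones_alt suspicious_mask min_zone_size merge_gap
instance (suspicious_mask : List Bool) (min_zone_size : Int) (merge_gap : Int) (out : List (Int × Int)) : Decidable (Spec_group_suspicious_zones suspicious_mask min_zone_size merge_gap out) := by unfold Spec_group_suspicious_zones; infer_instance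

-- ===== CLAIM (what is proved, stated in full; the proofs are below) =====
def Claim_equal_group_suspicious_zones : Prop := ∀ (suspicious_mask : List Bool) (min_zone_size : Int) (merge_gap : Int), Dom_group_suspicious_zones suspicious_mask min_zone_size merge_gap → Spec_group_suspicious_zones suspicious_mask min_zone_size merge_gap (group_suspicious_zones suspicious_mask min_zone_size merge_gap)

-- ===== LEMMAS AND PROOFS =====

-- Canonical list of (start, end) of the maximal true-runs of the mask,
-- with running index i and the optionally open run start.
def zAux : Option Int → Int → List Bool → List (Int × Int)
  | none, _, [] => []
  | some s, i, [] => [(s, i - 1)]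
  | none, i, c :: r => if c then zAux (some i) (i + 1) r else zAux none (i + 1) r
  | some s, i, c :: r => if c then zAux (some s) (i + 1) r else (s, i - 1) :: zAux none (i + 1) r

-- A's phase 1 (scan + trailing-run check) from a general state.
def phase1A (minz : Int) (i : Int) (zs : List (Int × Int)) (st : Option Int) (mask : List Bool) : List (Int × Int) :=
  match pyA_loop minz mask i st zs with
  | (z, some s) =>
    if (i + (mask.length : Int)) - s ≥ minz then z ++ [(s, i + (mask.length : Int) - 1)] else z
  | (z, none) => z

theorem phase1A_eq_zAux (minz : Int) (mask : List Bool) :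
    ∀ (i : Int) (zs : List (Int × Int)) (st : Option Int),
      phase1A minz i zs st mask = zs ++ (zAux st i mask).filter (fun z => decide (z.2 - z.1 + 1 ≥ minz)) := by
  induction mask with
  | nil =>
    intro i zs st
    cases st with
    | none => simp [phase1A, pyA_loop, zAux]
    | some s =>
      simp only [phase1A, pyA_loop, zAux, List.length_nil, Int.natCast_zero, add_zero,
        List.filter]
      have : ((i - 1 : Int) - s + 1 ≥ minz) ↔ (i - s ≥ minz) := by omega
      by_cases h : i - s ≥ minz
      · simp [h, this.mpr h]
      · simp [h, (not_iff_not.mpr this).mpr h]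
  | cons c rest ih =>
    intro i zs st
    have hlen : (i + ((c :: rest).length : Int)) = (i + 1) + (rest.length : Int) := by
      simp only [List.length_cons]; push_cast; ring
    cases st with
    | none =>
      cases c with
      | true =>
        have : phase1A minz i zs none (true :: rest) = phase1A minz (i + 1) zs (some i) rest := by
          simp only [phase1A, pyA_loop, hlen]; rfl
        rw [this, ih, zAux]; simp
      | false =>
        have : phase1A minz i zs none (false :: rest) = phase1A minz (i + 1) zs none rest := by
          simp only [phase1A, pyA_loop, hlen]; rfl
        rw [this, ih, zAux]; simp
    | some s =>
      cases c with
      | true =>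
        have : phase1A minz i zs (some s) (true :: rest) = phase1A minz (i + 1) zs (some s) rest := by
          simp only [phase1A, pyA_loop, hlen]; rfl
        rw [this, ih, zAux]; simp
      | false =>
        have hstep : phase1A minz i zs (some s) (false :: rest)
            = phase1A minz (i + 1) (if i - s ≥ minz then zs ++ [(s, i - 1)] else zs) none rest := by
          simp only [phase1A, pyA_loop, hlen]; rfl
        rw [hstep, ih]
        simp only [zAux, if_neg (by simp : ¬ (false = true)), List.filter_cons]
        have hcond : ((i - 1 : Int) - s + 1 ≥ minz) ↔ (i - s ≥ minz) := by omega
        by_cases h : i - s ≥ minz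
        · simp [h, hcond.mpr h, List.append_assoc]
        · simp [h, (not_iff_not.mpr hcond).mpr h]

-- Run starts / run ends read off the edges, with previous value prev and pair index j.
def startsR : Bool → Int → List Bool → List Int
  | prev, j, [] => (if !prev && false then [j] else [])
  | prev, j, c :: r => (if !prev && c then [j] else []) ++ startsR c (j + 1) r

def endsR : Bool → Int → List Bool → List Int
  | prev, j, [] => (if prev then [j - 1] else [])
  | prev, j, c :: r => (if prev && !c then [j - 1] else []) ++ endsR c (j + 1) r

theorem starts_eq_startsR (mask : List Bool) :
    ∀ (prev : Bool) (j : Int),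
      ((PySem.List.enumerate ((prev :: (mask ++ [false])).zip (mask ++ [false])) j).filter
        (fun x => !x.2.1 && x.2.2)).map (fun x => x.1) = startsR prev j mask := by
  induction mask with
  | nil =>
    intro prev j
    simp [PySem.List.enumerate_cons, PySem.List.enumerate_nil, startsR]
  | cons c r ih =>
    intro prev j
    simp only [List.cons_append, List.zip_cons_cons, PySem.List.enumerate_cons,
      List.filter_cons, startsR]
    by_cases h : (!prev && c) = true
    · simp only [h, if_pos, List.map_cons]
      rw [← ih c (j + 1)]; simp
    · have := ih c (j + 1)
      simp [h, this]

theorem ends_eq_endsR (mask : List Bool) :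
    ∀ (prev : Bool) (j : Int),
      ((PySem.List.enumerate ((prev :: (mask ++ [false])).zip (mask ++ [false])) j).filter
        (fun x => x.2.1 && !x.2.2)).map (fun x => x.1 - 1) = endsR prev j mask := by
  induction mask with
  | nil =>
    intro prev j
    cases prev <;> simp [PySem.List.enumerate_cons, PySem.List.enumerate_nil, endsR]
  | cons c r ih =>
    intro prev j
    simp only [List.cons_append, List.zip_cons_cons, PySem.List.enumerate_cons,
      List.filter_cons, endsR]
    by_cases h : (prev && !c) = true
    · simp only [h, if_pos, List.map_cons]
      rw [← ih c (j + 1)]; simp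
    · have := ih c (j + 1)
      simp [h, this]

-- Pairing the starts with the ends yields exactly the canonical run list.
theorem zip_startsR_endsR (mask : List Bool) :
    ∀ (i : Int),
      ((startsR false i mask).zip (endsR false i mask) = zAux none i mask) ∧
      (∀ s : Int, ((s :: startsR true i mask).zip (endsR true i mask)) = zAux (some s) i mask) := by
  induction mask with
  | nil =>
    intro i
    constructor
    · simp [startsR, endsR, zAux]
    · intro s; simp [startsR, endsR, zAux]
  | cons c r ih =>
    intro i
    cases c with
    | true =>
      constructor
      · simp only [startsR, endsR, zAux]
        simpa using (ih (i + 1)).2 i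
      · intro s
        simp only [startsR, endsR, zAux]
        simpa using (ih (i + 1)).2 s
    | false =>
      constructor
      · simp only [startsR, endsR, zAux]
        simpa using (ih (i + 1)).1
      · intro s
        have h1 := (ih (i + 1)).1
        simp [startsR, endsR, zAux, h1]

-- The recursive form of the merge.
def mergeRec (gap : Int) : Int × Int → List (Int × Int) → List (Int × Int)
  | cur, [] => [cur]
  | cur, z :: r => if z.1 - cur.2 ≤ gap then mergeRec gap (cur.1, z.2) r else cur :: mergeRec gap z r

-- A's merge fold computes mergeRec.
theorem mergeA_eq_mergeRec (gap : Int) (rest : List (Int × Int)) :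
    ∀ (m : List (Int × Int)) (cs ce : Int),
      ((rest.foldl
        (fun (a : List (Int × Int) × Int × Int) z =>
          if z.1 - a.2.2 ≤ gap then (a.1, a.2.1, z.2)
          else (a.1 ++ [(a.2.1, a.2.2)], z.1, z.2)) (m, cs, ce)).1 ++
       [((rest.foldl
        (fun (a : List (Int × Int) × Int × Int) z =>
          if z.1 - a.2.2 ≤ gap then (a.1, a.2.1, z.2)
          else (a.1 ++ [(a.2.1, a.2.2)], z.1, z.2)) (m, cs, ce)).2.1,
         (rest.foldl
        (fun (a : List (Int × Int) × Int × Int) z =>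
          if z.1 - a.2.2 ≤ gap then (a.1, a.2.1, z.2)
          else (a.1 ++ [(a.2.1, a.2.2)], z.1, z.2)) (m, cs, ce)).2.2)]) =
      m ++ mergeRec gap (cs, ce) rest := by
  induction rest with
  | nil => intro m cs ce; simp [mergeRec]
  | cons z rest ih =>
    intro m cs ce
    simp only [List.foldl_cons, mergeRec]
    by_cases h : z.1 - ce ≤ gap
    · simp only [h, if_pos]
      exact ih m cs z.2
    · simp only [h, if_neg, not_false_iff]
      have := ih (m ++ [(cs, ce)]) z.1 z.2
      simpa [List.append_assoc] using this
  
-- mergeRec's first zone: its start is cur's start, the rest ignores cur's start.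
theorem mergeRec_head (gap : Int) (r : List (Int × Int)) :
    ∀ (ce : Int), ∃ e2 tl, ∀ cs : Int, mergeRec gap (cs, ce) r = (cs, e2) :: tl := by
  induction r with
  | nil => intro ce; exact ⟨ce, [], fun cs => rfl⟩
  | cons z r ih =>
    intro ce
    by_cases h : z.1 - ce ≤ gap
    · obtain ⟨e2, tl, hall⟩ := ih z.2
      exact ⟨e2, tl, fun cs => by simp [mergeRec, h, hall cs]⟩
    · exact ⟨ce, mergeRec gap z r, fun cs => by simp [mergeRec, h]⟩

-- B's right-to-left merge fold computes mergeRec as well.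
theorem mergeB_eq_mergeRec (gap : Int) (l : List (Int × Int)) (zl : Int × Int) :
    (l.reverse).foldl
        (fun mrev z =>
          match mrev with
          | cur :: rest => if cur.1 - z.2 ≤ gap then (z.1, cur.2) :: rest else z :: cur :: rest
          | [] => [z])
        [zl]
      = (match l with
         | [] => [zl]
         | z :: r => mergeRec gap z (r ++ [zl])) := by
  rw [List.foldl_reverse]
  induction l with
  | nil => rfl
  | cons z l ih =>
    simp only [List.foldr_cons, ih]
    cases l with
    | nil =>
      show (if zl.1 - z.2 ≤ gap then (z.1, zl.2) :: [] else z :: zl :: []) = mergeRec gap z [zl]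
      by_cases h : zl.1 - z.2 ≤ gap <;> simp [h, mergeRec]
    | cons w r =>
      obtain ⟨e2, tl, hall⟩ := mergeRec_head gap (r ++ [zl]) w.2
      have hw : mergeRec gap w (r ++ [zl]) = (w.1, e2) :: tl := hall w.1
      show (match mergeRec gap w (r ++ [zl]) with
            | cur :: rest => if cur.1 - z.2 ≤ gap then (z.1, cur.2) :: rest else z :: cur :: rest
            | [] => [z]) = mergeRec gap z ((w :: r) ++ [zl])
      rw [hw]
      simp only [List.cons_append, mergeRec]
      by_cases h : w.1 - z.2 ≤ gap
      · simp [h, hall z.1]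
      · simp [h, hw]

-- B's merge expression in closed form.
theorem mergeB_closed (gap : Int) (z0 : Int × Int) (rest : List (Int × Int)) :
    (match (z0 :: rest).getLast? with
     | none => z0 :: rest
     | some zl =>
        (((z0 :: rest).dropLast).reverse).foldl
          (fun mrev z =>
            match mrev with
            | cur :: rest => if cur.1 - z.2 ≤ gap then (z.1, cur.2) :: rest else z :: cur :: rest
            | [] => [z])
          [zl])
      = mergeRec gap z0 rest := by
  have hlast : (z0 :: rest).getLast? = some ((z0 :: rest).getLast (by simp)) :=
    List.getLast?_eq_some_getLast (by simp)
  rw [hlast]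
  show (((z0 :: rest).dropLast).reverse).foldl
      (fun mrev z =>
        match mrev with
        | cur :: rest => if cur.1 - z.2 ≤ gap then (z.1, cur.2) :: rest else z :: cur :: rest
        | [] => [z])
      [(z0 :: rest).getLast (by simp)] = mergeRec gap z0 rest
  rw [mergeB_eq_mergeRec]
  cases rest with
  | nil => simp [mergeRec]
  | cons a b =>
    have hdl : (z0 :: a :: b).dropLast = z0 :: (a :: b).dropLast := rfl
    have hgl : (z0 :: a :: b).getLast (by simp) = (a :: b).getLast (by simp) :=
      List.getLast_cons (by simp)
    rw [hdl, hgl]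
    have hcat : (a :: b).dropLast ++ [(a :: b).getLast (by simp)] = a :: b :=
      List.dropLast_concat_getLast (by simp)
    simp only [hcat]

-- ===== VERDICT (by name: the statement is the Claim_ definition above) =====
theorem group_suspicious_zones_spec : Claim_equal_group_suspicious_zones := by
  intro mask minz gap _
  unfold Spec_group_suspicious_zones group_suspicious_zones group_suspicious_zones_alt
  have hA : (match pyA_loop minz mask 0 none [] with
      | (z, some s) =>
        if (mask.length : Int) - s ≥ minz then z ++ [(s, (mask.length : Int) - 1)] else z
      | (z, none) => z) =
      (zAux none 0 mask).filter (fun z => decide (z.2 - z.1 + 1 ≥ minz)) := by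
    have h := phase1A_eq_zAux minz mask 0 [] none
    unfold phase1A at h
    simpa using h
  have hzip : ([false] ++ mask ++ [false]).zip (([false] ++ mask ++ [false]).drop 1)
      = (false :: (mask ++ [false])).zip (mask ++ [false]) := by
    simp
  have hB : ((((PySem.List.enumerate (([false] ++ mask ++ [false]).zip (([false] ++ mask ++ [false]).drop 1)) 0).filter
        (fun x => !x.2.1 && x.2.2)).map (fun x => x.1)).zip
      (((PySem.List.enumerate (([false] ++ mask ++ [false]).zip (([false] ++ mask ++ [false]).drop 1)) 0).filter
        (fun x => x.2.1 && !x.2.2)).map (fun x => x.1 - 1))).filter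
        (fun z => decide (z.2 - z.1 + 1 ≥ minz))
      = (zAux none 0 mask).filter (fun z => decide (z.2 - z.1 + 1 ≥ minz)) := by
    rw [hzip, starts_eq_startsR mask false 0, ends_eq_endsR mask false 0,
      (zip_startsR_endsR mask 0).1]
  simp only [hA, hB]
  set zones := (zAux none 0 mask).filter (fun z => decide (z.2 - z.1 + 1 ≥ minz)) with hzones
  by_cases hg : gap > 0 ∧ zones.length > 1
  · rw [if_pos hg, if_pos hg]
    cases hzz : zones with
    | nil => simp
    | cons z0 rest =>
      rw [mergeB_closed gap z0 rest]
      have hA' := mergeA_eq_mergeRec gap rest [] z0.1 z0.2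
      simp only [List.nil_append] at hA'
      simpa using hA'
  · rw [if_neg hg, if_neg hg]
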